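-- pv_equiv track=rewrite | github.com/vvn-hsu/modoya | module.py | filter_furniture
-- ===== SOURCE A (Python) =====
-- def filter_furniture(items, category=None, style=None, color=None, season=None):
--     filtered_items = items
--
--     if category:
--         filtered_items = [item for item in filtered_items if item['metadata'].get('category', '').lower() == category.lower()]
--
--     if style:
--         filtered_items = [item for item in filtered_items if item['metadata'].get('style', '').lower() == style.lower()]
--
--     if color:
--         filtered_items = [item for item in filtered_items if item['metadata'].get('color', '').lower() == color.lower()]
--
--     if season:
--         filtered_items = [item for item in filtered_items if item['metadata'].get('season', '').lower() == season.lower()]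
--
--     return filtered_items
-- ===== SOURCE B (Python) =====
-- def filter_furniture(items, category=None, style=None, color=None, season=None):
--     criteria = [(field, value.lower())
--                 for field, value in (('category', category), ('style', style),
--                                      ('color', color), ('season', season))
--                 if value]
--     if not criteria:
--         return items
--     return [item for item in items
--             if all(item['metadata'].get(field, '').lower() == want
--                    for field, want in criteria)]
-- ===== Notes on version B (the rewrite author's own statement) =====
-- stated objective: simpler
-- what changed: Replaces A's four sequential filtering passes (one list rebuild per active filter) with a criteria table built once and a single pass keeping items that satisfy all active criteria.
import Mathlib
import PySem

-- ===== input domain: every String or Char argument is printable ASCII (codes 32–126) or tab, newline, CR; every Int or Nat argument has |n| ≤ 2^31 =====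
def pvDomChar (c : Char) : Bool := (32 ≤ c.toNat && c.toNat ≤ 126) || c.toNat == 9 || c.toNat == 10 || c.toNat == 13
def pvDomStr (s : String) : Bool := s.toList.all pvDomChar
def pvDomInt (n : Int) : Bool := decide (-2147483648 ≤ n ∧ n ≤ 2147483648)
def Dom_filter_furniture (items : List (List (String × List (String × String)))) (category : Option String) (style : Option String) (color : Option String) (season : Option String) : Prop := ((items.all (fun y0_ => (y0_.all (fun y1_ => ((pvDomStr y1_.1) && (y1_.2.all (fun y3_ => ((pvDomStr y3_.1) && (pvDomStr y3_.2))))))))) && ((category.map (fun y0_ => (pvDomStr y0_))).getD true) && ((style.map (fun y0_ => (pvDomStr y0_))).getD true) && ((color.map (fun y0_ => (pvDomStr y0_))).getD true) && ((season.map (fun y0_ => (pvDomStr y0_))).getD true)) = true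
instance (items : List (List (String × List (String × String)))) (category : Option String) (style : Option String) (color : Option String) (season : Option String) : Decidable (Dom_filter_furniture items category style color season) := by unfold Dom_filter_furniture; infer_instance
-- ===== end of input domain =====

-- ===== PORT A =====
-- B replaces A's four sequential filtering passes with one pass over a criteria table (objective: simpler).
-- Pre_ excludes inputs where Python A raises KeyError ('metadata' missing while a filter is active); B raises there too.
-- A-side helper: item['metadata'].get(field, '').lower()  (metadata defaulted to {} — Pre_ guarantees it is present)
def pvGetLowerA (item : List (String × List (String × String))) (field : String) : String :=
  PySem.Str.lower ((((((item.find? (fun p => p.1 == "metadata")).map (·.2)).getD []).find? (fun q => q.1 == field)).map (·.2)).getD "")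

def filter_furniture (items : List (List (String × List (String × String)))) (category : Option String) (style : Option String) (color : Option String) (season : Option String) : List (List (String × List (String × String))) :=
  let f0 := items
  let f1 := match category with
    | some c => if c ≠ "" then f0.filter (fun it => pvGetLowerA it "category" == PySem.Str.lower c) else f0
    | none => f0
  let f2 := match style with
    | some s => if s ≠ "" then f1.filter (fun it => pvGetLowerA it "style" == PySem.Str.lower s) else f1
    | none => f1
  let f3 := match color with
    | some s => if s ≠ "" then f2.filter (fun it => pvGetLowerA it "color" == PySem.Str.lower s) else f2
    | none => f2
  let f4 := match season with
    | some s => if s ≠ "" then f3.filter (fun it => pvGetLowerA it "season" == PySem.Str.lower s) else f3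
    | none => f3
  f4

-- ===== PORT B =====
-- B-side helper: the active criteria table [(field, value.lower()) for truthy values]
def pvCriteriaB (category style color season : Option String) : List (String × String) :=
  [("category", category), ("style", style), ("color", color), ("season", season)].filterMap
    (fun p => p.2.bind (fun v => if v ≠ "" then some (p.1, PySem.Str.lower v) else none))

-- B-side helper: all(item['metadata'].get(field, '').lower() == want for field, want in criteria)
def pvMatchesB (item : List (String × List (String × String))) (criteria : List (String × String)) : Bool :=
  criteria.all (fun c =>
    PySem.Str.lower ((((((item.find? (fun p => p.1 == "metadata")).map (·.2)).getD []).find? (fun q => q.1 == c.1)).map (·.2)).getD "") == c.2)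

def filter_furniture_alt (items : List (List (String × List (String × String)))) (category : Option String) (style : Option String) (color : Option String) (season : Option String) : List (List (String × List (String × String))) :=
  let criteria := pvCriteriaB category style color season
  if criteria.isEmpty then items
  else items.filter (fun item => pvMatchesB item criteria)

-- ===== PRECONDITION & SPEC =====
-- Pre_ excludes exactly the inputs where Python A raises KeyError: some filter argument is
-- truthy (a non-empty string) while some item lacks a 'metadata' key. B raises there too.
def Pre_filter_furniture (items : List (List (String × List (String × String)))) (category : Option String) (style : Option String) (color : Option String) (season : Option String) : Prop :=
  (category.getD "" ≠ "" ∨ style.getD "" ≠ "" ∨ color.getD "" ≠ "" ∨ season.getD "" ≠ "") →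
    (items.all (fun it => it.any (fun p => p.1 == "metadata"))) = true
instance (items : List (List (String × List (String × String)))) (category : Option String) (style : Option String) (color : Option String) (season : Option String) : Decidable (Pre_filter_furniture items category style color season) := by unfold Pre_filter_furniture; infer_instance

def pvWitness_filter_furniture : (List (List (String × List (String × String)))) × Option String × Option String × Option String × Option String :=
  ([[("metadata", [("category", "Chair"), ("color", "red")])], [("metadata", [("category", "table")])]], some "chair", none, some "", some "Red")
def Spec_filter_furniture (items : List (List (String × List (String × String)))) (category : Option String) (style : Option String) (color : Option String) (season : Option String) (out : List (List (String × List (String × String)))) : Prop := out = filter_furniture_alt items category style color season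
instance (items : List (List (String × List (String × String)))) (category : Option String) (style : Option String) (color : Option String) (season : Option String) (out : List (List (String × List (String × String)))) : Decidable (Spec_filter_furniture items category style color season out) := by unfold Spec_filter_furniture; infer_instance

-- ===== CLAIM (what is proved, stated in full; the proofs are below) =====
def Claim_equal_filter_furniture : Prop := ∀ (items : List (List (String × List (String × String)))) (category : Option String) (style : Option String) (color : Option String) (season : Option String), Dom_filter_furniture items category style color season → Pre_filter_furniture items category style color season → Spec_filter_furniture items category style color season (filter_furniture items category style color season)

-- ===== LEMMAS AND PROOFS =====

-- the criteria contributed by one optional filter argument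
def pvPiece (field : String) (o : Option String) : List (String × String) :=
  match o with
  | some v => if v ≠ "" then [(field, PySem.Str.lower v)] else []
  | none => []

theorem pvMatchesB_append (it : List (String × List (String × String))) (cs ds : List (String × String)) :
    pvMatchesB it (cs ++ ds) = (pvMatchesB it cs && pvMatchesB it ds) := by
  simp [pvMatchesB]

theorem pvMatchesB_nil (it : List (String × List (String × String))) : pvMatchesB it [] = true := by
  simp [pvMatchesB]

theorem filter_matches_append (l : List (List (String × List (String × String)))) (cs ds : List (String × String)) :
    (l.filter (fun it => pvMatchesB it cs)).filter (fun it => pvMatchesB it ds)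
      = l.filter (fun it => pvMatchesB it (cs ++ ds)) := by
  rw [List.filter_filter]
  apply List.filter_congr
  intro it _
  rw [pvMatchesB_append, Bool.and_comm]

-- one sequential pass of A equals filtering by that argument's piece
theorem pvStep (l : List (List (String × List (String × String)))) (field : String) (o : Option String) :
    (match o with
     | some v => if v ≠ "" then l.filter (fun it => pvGetLowerA it field == PySem.Str.lower v) else l
     | none => l)
      = l.filter (fun it => pvMatchesB it (pvPiece field o)) := by
  rcases o with _ | v
  · simp [pvPiece, pvMatchesB_nil]
  · by_cases h : v = "" <;> simp [pvPiece, h, pvMatchesB, pvGetLowerA]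

theorem pvCriteriaB_eq (category style color season : Option String) :
    pvCriteriaB category style color season
      = pvPiece "category" category ++ pvPiece "style" style ++ pvPiece "color" color ++ pvPiece "season" season := by
  rcases category with _ | c <;> rcases style with _ | s <;> rcases color with _ | co <;> rcases season with _ | se <;>
    (simp only [pvCriteriaB, pvPiece, List.filterMap, Option.bind]; try split_ifs) <;> simp

theorem filter_furniture_eq_filter (items : List (List (String × List (String × String)))) (category style color season : Option String) :
    filter_furniture items category style color season
      = items.filter (fun it => pvMatchesB it (pvCriteriaB category style color season)) := by
  dsimp only [filter_furniture]
  rw [pvStep items "category" category, pvStep _ "style" style, pvStep _ "color" color, pvStep _ "season" season,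
    filter_matches_append, filter_matches_append, filter_matches_append, pvCriteriaB_eq]
  simp only [List.append_assoc]

-- ===== VERDICT =====
theorem filter_furniture_spec : Claim_equal_filter_furniture := by
  intro items category style color season _ _
  unfold Spec_filter_furniture filter_furniture_alt
  rw [filter_furniture_eq_filter]
  by_cases h : (pvCriteriaB category style color season).isEmpty
  · rw [List.isEmpty_iff] at h
    simp [h, pvMatchesB_nil]
  · simp [h]
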